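-- pv_equiv track=rewrite | github.com/e-gun/HipparchiaServer | server/textsandindices/indexmaker.py | htmlifysimpleindex
-- ===== SOURCE A (Python) =====
-- from typing import List
--
-- def htmlifysimpleindex(completeindexdict, onework) -> List[tuple]:
-- 	"""
--
-- 	:param completeindexdict:
-- 	:param onework:
-- 	:return:
-- 	"""
--
-- 	unsortedoutput = list()
--
-- 	for c in completeindexdict.keys():
-- 		hits = completeindexdict[c]
-- 		count = str(len(hits))
-- 		hits = sorted(hits)
-- 		if onework:
-- 			hits = [h[2] for h in hits]
-- 			loci = ', '.join(hits)
-- 		else: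
-- 			previouswork = hits[0][0]
-- 			loci = '<span class="work">{wk}</span>: '.format(wk=previouswork[6:10])
-- 			for hit in hits:
-- 				if hit[0] == previouswork:
-- 					loci += hit[2] + ', '
-- 				else:
-- 					loci = loci[:-2] + '; '
-- 					previouswork = hit[0]
-- 					loci += '<span class="work">{wk}</span>: '.format(wk=previouswork[6:10])
-- 					loci += hit[2] + ', '
-- 			loci = loci[:-2]
--
-- 		unsortedoutput.append((c, count, loci))
--
-- 	return unsortedoutput
-- ===== SOURCE B (Python) =====
-- def htmlifysimpleindex(completeindexdict, onework):
-- 	"""group-then-render: build per-work segments and join them (no sentinel/trim)"""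
-- 	output = []
-- 	for c, hits in completeindexdict.items():
-- 		count = str(len(hits))
-- 		hits = sorted(hits)
-- 		if onework:
-- 			loci = ', '.join(h[2] for h in hits)
-- 		else:
-- 			groups = []
-- 			for h in hits:
-- 				if groups and groups[-1][0] == h[0]:
-- 					groups[-1][1].append(h[2])
-- 				else:
-- 					groups.append((h[0], [h[2]]))
-- 			loci = '; '.join(
-- 				'<span class="work">{wk}</span>: '.format(wk=w[6:10]) + ', '.join(ls)
-- 				for w, ls in groups)
-- 		output.append((c, count, loci))
-- 	return output
-- ===== Notes on version B (the rewrite author's own statement) =====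
-- stated objective: simpler
-- what changed: The non-onework branch no longer streams with a previouswork sentinel and trailing-', ' trimming: B first groups the sorted hits into consecutive (work, loci) runs, renders each run as header + ', '.join, and joins the runs with '; '.
import Mathlib
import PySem

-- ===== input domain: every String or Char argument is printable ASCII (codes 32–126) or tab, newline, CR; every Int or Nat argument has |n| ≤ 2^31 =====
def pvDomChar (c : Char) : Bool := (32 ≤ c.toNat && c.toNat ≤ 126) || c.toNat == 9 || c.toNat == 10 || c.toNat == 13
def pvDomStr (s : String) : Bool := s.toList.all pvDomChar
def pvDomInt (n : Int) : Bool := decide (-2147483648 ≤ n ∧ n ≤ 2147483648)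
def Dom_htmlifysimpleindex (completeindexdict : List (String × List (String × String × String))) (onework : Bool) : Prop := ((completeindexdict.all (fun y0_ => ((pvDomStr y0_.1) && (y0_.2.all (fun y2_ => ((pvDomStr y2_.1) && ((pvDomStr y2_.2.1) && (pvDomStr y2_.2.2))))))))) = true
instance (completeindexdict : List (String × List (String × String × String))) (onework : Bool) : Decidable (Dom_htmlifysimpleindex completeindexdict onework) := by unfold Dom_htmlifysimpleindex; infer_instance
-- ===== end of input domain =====

-- B replaces A's sentinel-and-trim streaming of the per-work loci with a group-then-render
-- pass (build (work, loci-list) runs, render each, join with '; '): simpler, no trailing-', ' trimming.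
-- Return-value equivalence only; neither program mutates its arguments observably.

-- ===== PORT A =====
-- shared by both ports (both Pythons call sorted(hits) on 3-tuples of strings and
-- format the same '<span …>' header): Python's tuple '<' and the stable insertion
-- sort in exactly PySem.List.sorted's foldl/insertBy shape (sorted_eq_foldl_insertBy).
def pyLt3 (x y : String × String × String) : Bool :=
  decide (x.1 < y.1) || (x.1 == y.1 && (decide (x.2.1 < y.2.1) || (x.2.1 == y.2.1 && decide (x.2.2 < y.2.2))))

def pySort3 (xs : List (String × String × String)) : List (String × String × String) :=
  xs.foldl (fun acc x => PySem.List.insertBy pyLt3 x acc) []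

-- '<span class="work">{wk}</span>: '.format(wk=w[6:10])
def wkSpan (w : String) : List Char :=
  "<span class=\"work\">".toList ++ PySem.List.slice w.toList (some 6) (some 10) ++ "</span>: ".toList

-- the body of A's inner 'for hit in hits' loop; state = (previouswork, loci)
def aStep (st : String × List Char) (hit : String × String × String) : String × List Char :=
  if hit.1 == st.1 then
    (st.1, st.2 ++ hit.2.2.toList ++ [',', ' '])
  else
    (hit.1, PySem.List.slice st.2 none (some (-2)) ++ [';', ' '] ++ wkSpan hit.1 ++ hit.2.2.toList ++ [',', ' '])

def htmlifysimpleindex (completeindexdict : List (String × List (String × String × String))) (onework : Bool) : List (String × String × String) :=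
  completeindexdict.foldl (fun acc e =>
    let hits := e.2
    let count := PySem.Int.toStr (hits.length : Int)
    let shits := pySort3 hits
    let loci : List Char :=
      if onework then
        PySem.Chars.join [',', ' '] (shits.map (fun h => h.2.2.toList))
      else
        match shits with
        | [] => []   -- unreachable under Pre_: Python raises IndexError at hits[0][0]
        | h0 :: _ =>
          let st := shits.foldl aStep (h0.1, wkSpan h0.1)
          PySem.List.slice st.2 none (some (-2))
    acc ++ [(e.1, count, String.ofList loci)]) []

-- ===== PORT B =====
-- the body of B's grouping loop: extend the last (work, loci) run or open a new one
def bStep (gs : List (String × List (List Char))) (h : String × String × String) : List (String × List (List Char)) :=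
  match gs.getLast? with
  | some g => if g.1 == h.1 then gs.dropLast ++ [(g.1, g.2 ++ [h.2.2.toList])] else gs ++ [(h.1, [h.2.2.toList])]
  | none => [(h.1, [h.2.2.toList])]

def segRender (g : String × List (List Char)) : List Char :=
  wkSpan g.1 ++ PySem.Chars.join [',', ' '] g.2

def htmlifysimpleindex_alt (completeindexdict : List (String × List (String × String × String))) (onework : Bool) : List (String × String × String) :=
  completeindexdict.foldl (fun acc e =>
    let count := PySem.Int.toStr (e.2.length : Int)
    let shits := pySort3 e.2
    let loci : List Char :=
      if onework then
        PySem.Chars.join [',', ' '] (shits.map (fun h => h.2.2.toList))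
      else
        PySem.Chars.join [';', ' '] ((shits.foldl bStep []).map segRender)
    acc ++ [(e.1, count, String.ofList loci)]) []

-- ===== PRECONDITION & SPEC =====
-- Pre_ excludes only the inputs where A raises: with onework false, any key whose hit
-- list is empty makes A's 'hits[0][0]' raise IndexError (B returns '' loci there).
def Pre_htmlifysimpleindex (completeindexdict : List (String × List (String × String × String))) (onework : Bool) : Prop :=
  onework = true ∨ ∀ e ∈ completeindexdict, e.2 ≠ []
instance (completeindexdict : List (String × List (String × String × String))) (onework : Bool) : Decidable (Pre_htmlifysimpleindex completeindexdict onework) := by unfold Pre_htmlifysimpleindex; infer_instance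

def pvWitness_htmlifysimpleindex : (List (String × List (String × String × String))) × Bool :=
  ([("abc", [("gr0001w001", "1", "5.2"), ("gr0001w002", "1", "3.1")])], false)

def Spec_htmlifysimpleindex (completeindexdict : List (String × List (String × String × String))) (onework : Bool) (out : List (String × String × String)) : Prop := out = htmlifysimpleindex_alt completeindexdict onework
instance (completeindexdict : List (String × List (String × String × String))) (onework : Bool) (out : List (String × String × String)) : Decidable (Spec_htmlifysimpleindex completeindexdict onework out) := by unfold Spec_htmlifysimpleindex; infer_instance

-- ===== CLAIM (what is proved, stated in full; the proofs are below) =====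
def Claim_equal_htmlifysimpleindex : Prop := ∀ (completeindexdict : List (String × List (String × String × String))) (onework : Bool), Dom_htmlifysimpleindex completeindexdict onework → Pre_htmlifysimpleindex completeindexdict onework → Spec_htmlifysimpleindex completeindexdict onework (htmlifysimpleindex completeindexdict onework)


-- ===== LEMMAS AND PROOFS =====

-- ', '-join of a run with one more locus appended (run nonempty)
theorem join_append_singleton (sep : List Char) (ls : List (List Char)) (x : List Char) (h : ls ≠ []) :
    PySem.Chars.join sep (ls ++ [x]) = PySem.Chars.join sep ls ++ sep ++ x := by
  induction ls with
  | nil => exact absurd rfl h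
  | cons y ys ih =>
    cases ys with
    | nil => simp [PySem.Chars.join_cons_cons, PySem.Chars.join_singleton]
    | cons z zs =>
      have := ih (by simp)
      simp only [List.cons_append, PySem.Chars.join_cons_cons, List.cons_append] at *
      rw [this]; simp [List.append_assoc]

-- appending characters to the LAST part of a join appends them to the join
theorem join_append_last (sep : List Char) (init : List (List Char)) (a x : List Char) :
    PySem.Chars.join sep (init ++ [a ++ x]) = PySem.Chars.join sep (init ++ [a]) ++ x := by
  cases init with
  | nil => simp [PySem.Chars.join_singleton]
  | cons y ys =>
    rw [join_append_singleton sep (y :: ys) (a ++ x) (by simp),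
        join_append_singleton sep (y :: ys) a (by simp)]
    simp [List.append_assoc]

-- trimming loci[:-2] of a string that ends in ', '
theorem trim2 (y : List Char) (a b : Char) :
    PySem.List.slice (y ++ [a, b]) none (some (-2)) = y := by
  rw [PySem.List.slice_to_neg_ofNat _ 2 (by omega)]
  simp

def rend (gs : List (String × List (List Char))) : List Char :=
  PySem.Chars.join [';', ' '] (gs.map segRender)

theorem rend_append (gs : List (String × List (List Char))) (g : String × List (List Char)) (h : gs ≠ []) :
    rend (gs ++ [g]) = rend gs ++ [';', ' '] ++ segRender g := by
  unfold rend
  rw [List.map_append, List.map_singleton, join_append_singleton _ _ _ (by simpa using h)]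

theorem rend_extend (init : List (String × List (List Char))) (w : String) (ls : List (List Char))
    (x : List Char) (hls : ls ≠ []) :
    rend (init ++ [(w, ls ++ [x])]) = rend (init ++ [(w, ls)]) ++ [',', ' '] ++ x := by
  unfold rend
  rw [List.map_append, List.map_append, List.map_singleton, List.map_singleton]
  have hseg : segRender (w, ls ++ [x]) = segRender (w, ls) ++ ([',', ' '] ++ x) := by
    unfold segRender
    rw [join_append_singleton _ _ _ hls]; simp [List.append_assoc]
  rw [hseg, ← List.append_assoc (segRender (w, ls)) [',', ' '] x, join_append_last, join_append_last]

-- main invariant: A's streaming loop keeps loci = rend(B's groups so far) ++ ', '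
theorem stream_eq_groups (t : List (String × String × String)) :
    ∀ (gs : List (String × List (List Char))) (pw : String) (hgs : gs ≠ []),
    (∀ g ∈ gs, g.2 ≠ []) → (gs.getLast hgs).1 = pw →
    (t.foldl aStep (pw, rend gs ++ [',', ' '])).2 = rend (t.foldl bStep gs) ++ [',', ' '] := by
  induction t with
  | nil => intro gs pw hgs _ _; rfl
  | cons h t ih =>
    intro gs pw hgs hne hlast
    obtain ⟨init, last, rfl⟩ : ∃ init last, gs = init ++ [last] := by
      cases gs with
      | nil => exact absurd rfl hgs
      | cons a as => exact ⟨(a :: as).dropLast, (a :: as).getLast (by simp),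
          (List.dropLast_append_getLast (by simp)).symm⟩
    have hlast' : (init ++ [last]).getLast hgs = last := by simp
    rw [hlast'] at hlast
    simp only [List.foldl_cons]
    by_cases heq : h.1 = pw
    · -- same work: extend the last run / append 'loc, '
      have hstep : aStep (pw, rend (init ++ [last]) ++ [',', ' ']) h
          = (pw, rend (init ++ [last]) ++ [',', ' '] ++ h.2.2.toList ++ [',', ' ']) := by
        simp [aStep, heq]
      have hbstep : bStep (init ++ [last]) h = init ++ [(last.1, last.2 ++ [h.2.2.toList])] := by
        simp [bStep, heq, hlast]
      have hrend : rend (init ++ [(last.1, last.2 ++ [h.2.2.toList])])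
          = rend (init ++ [last]) ++ [',', ' '] ++ h.2.2.toList := by
        have := rend_extend init last.1 last.2 h.2.2.toList
          (hne last (by simp))
        simpa using this
      rw [hstep, hbstep]
      have := ih (init ++ [(last.1, last.2 ++ [h.2.2.toList])]) pw (by simp)
        (by intro g hg
            rcases List.mem_append.1 hg with hg | hg
            · exact hne g (List.mem_append_left _ hg)
            · simp at hg; subst hg; simp)
        (by simp [hlast])
      rw [hrend] at this
      simpa [List.append_assoc] using this
    · -- new work: close the run and open a new one
      have hstep : aStep (pw, rend (init ++ [last]) ++ [',', ' ']) h
          = (h.1, PySem.List.slice (rend (init ++ [last]) ++ [',', ' ']) none (some (-2))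
              ++ [';', ' '] ++ wkSpan h.1 ++ h.2.2.toList ++ [',', ' ']) := by
        simp [aStep, heq]
      have hbstep : bStep (init ++ [last]) h = (init ++ [last]) ++ [(h.1, [h.2.2.toList])] := by
        have : ¬ (last.1 == h.1) = true := by
          simp only [beq_iff_eq]; intro hc; exact heq (by rw [← hc, hlast])
        simp [bStep, this]
      have hrend : rend ((init ++ [last]) ++ [(h.1, [h.2.2.toList])])
          = rend (init ++ [last]) ++ [';', ' '] ++ (wkSpan h.1 ++ h.2.2.toList) := by
        rw [rend_append _ _ (by simp)]
        simp [segRender, PySem.Chars.join_singleton]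
      rw [hstep, hbstep]
      have := ih ((init ++ [last]) ++ [(h.1, [h.2.2.toList])]) h.1 (by simp)
        (by intro g hg
            rcases List.mem_append.1 hg with hg | hg
            · exact hne g hg
            · simp at hg; subst hg; simp)
        (by simp)
      rw [hrend] at this
      rw [trim2]
      simpa [List.append_assoc] using this

theorem pySort3_ne_nil (hits : List (String × String × String)) (h : hits ≠ []) : pySort3 hits ≠ [] := by
  unfold pySort3
  cases hits with
  | nil => exact absurd rfl h
  | cons a as =>
    have key : ∀ (t : List (String × String × String)) (acc : List (String × String × String)),
        acc ≠ [] → t.foldl (fun acc x => PySem.List.insertBy pyLt3 x acc) acc ≠ [] := by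
      intro t
      induction t with
      | nil => intro acc ha; simpa using ha
      | cons b bs ih =>
        intro acc ha
        simp only [List.foldl_cons]
        exact ih _ (List.ne_nil_of_mem ((PySem.List.mem_insertBy pyLt3 b b acc).2 (Or.inl rfl)))
    simp only [List.foldl_cons]
    exact key as _ (List.ne_nil_of_mem ((PySem.List.mem_insertBy pyLt3 a a []).2 (Or.inl rfl)))

-- per-entry equality of the two loci computations (non-onework branch), hits nonempty
theorem entry_loci (hits : List (String × String × String)) (hne : hits ≠ []) :
    (match pySort3 hits with
      | [] => ([] : List Char)
      | h0 :: _ =>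
        PySem.List.slice ((pySort3 hits).foldl aStep (h0.1, wkSpan h0.1)).2 none (some (-2)))
    = PySem.Chars.join [';', ' '] (((pySort3 hits).foldl bStep []).map segRender) := by
  obtain ⟨h0, t, hs⟩ : ∃ h0 t, pySort3 hits = h0 :: t := by
    cases hh : pySort3 hits with
    | nil => exact absurd hh (pySort3_ne_nil hits hne)
    | cons a as => exact ⟨a, as, rfl⟩
  rw [hs]
  simp only [List.foldl_cons]
  have hstep0 : aStep (h0.1, wkSpan h0.1) h0 = (h0.1, rend [(h0.1, [h0.2.2.toList])] ++ [',', ' ']) := by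
    simp [aStep, rend, segRender, PySem.Chars.join_singleton, List.append_assoc]
  have hb0 : bStep [] h0 = [(h0.1, [h0.2.2.toList])] := by simp [bStep]
  rw [hstep0, hb0]
  rw [stream_eq_groups t [(h0.1, [h0.2.2.toList])] h0.1 (by simp) (by simp) (by simp)]
  rw [trim2]
  rfl

-- ===== VERDICT (by name: the statement is the Claim_ definition above) =====
theorem htmlifysimpleindex_spec : Claim_equal_htmlifysimpleindex := by
  intro d onework _ hpre
  unfold Spec_htmlifysimpleindex htmlifysimpleindex htmlifysimpleindex_alt
  rw [PySem.List.foldl_append_singleton_eq_map, PySem.List.foldl_append_singleton_eq_map]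
  simp only [List.nil_append]
  apply List.map_congr_left
  intro e he
  cases onework with
  | true => rfl
  | false =>
    have hne : e.2 ≠ [] := by
      rcases hpre with h | h
      · exact absurd h (by simp)
      · exact h e he
    simp only [if_neg (by simp : ¬ (false = true))]
    exact congrArg _ (congrArg _ (congrArg _ (entry_loci e.2 hne)))
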